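-- pv_equiv track=rewrite | github.com/xeroxzen/MIT-Computer-Science-and-Programming-Using-Python | all_examples.py | gen_subsets
-- ===== SOURCE A (Python) =====
-- def gen_subsets(L):
--     """
--     Exponential Complexity
--
--     1. it's prevalent to think about size of smaller
--     2. Remember that for a set of size K there are pow(2, k) cases
--     3. To solve this we need something like pow(2, n-1) + pow(2, n-2) + ... + pow(2, 0)
--
--     >>> gen_subsets([1,2])
--     [[], [1], [2], [1, 2]]
--     >>> gen_subsets([1,3])
--     [[], [1], [3], [1, 3]]
--     >>> gen_subsets([1,2,3])
--     [[], [1], [2], [1, 2], [3], [1, 3], [2, 3], [1, 2, 3]]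
--     """
--     res = [] # empty list
--     if len(L) == 0:
--         return [[]] # list of an empty list
--     smaller = gen_subsets(L[:-1]) # recursive return all subsets without last element
--     extra = L[-1:] # create a list of just the last element
--     new = [] # again, empty list
--     for small in smaller:
--         new.append(small + extra) # for all smaller solutions, add one with last element
--     return smaller + new
-- ===== SOURCE B (Python) =====
-- def gen_subsets(L):
--     res = [[]]
--     for x in L:
--         res = res + [s + [x] for s in res]
--     return res
-- ===== Notes on version B (the rewrite author's own statement) =====
-- stated objective: simpler
-- what changed: Replaced the recursion on L[:-1] (with slicing and an append loop) by a single forward fold that doubles the result list at each element; same subset order, no recursion and no slicing.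
import Mathlib
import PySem

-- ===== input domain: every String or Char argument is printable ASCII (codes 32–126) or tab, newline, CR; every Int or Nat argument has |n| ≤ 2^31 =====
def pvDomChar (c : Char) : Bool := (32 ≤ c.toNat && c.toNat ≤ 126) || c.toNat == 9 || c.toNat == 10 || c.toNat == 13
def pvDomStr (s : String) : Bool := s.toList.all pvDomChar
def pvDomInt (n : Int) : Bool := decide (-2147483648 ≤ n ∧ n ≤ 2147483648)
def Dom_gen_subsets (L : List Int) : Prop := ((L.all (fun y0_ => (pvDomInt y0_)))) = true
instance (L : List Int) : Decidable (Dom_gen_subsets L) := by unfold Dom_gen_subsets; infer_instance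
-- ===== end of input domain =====

/-
B replaces A's recursion on L[:-1] with one forward fold doubling the result per element; objective: simpler.
-/


-- ===== PORT A =====
-- transliteration of A: recursion on L[:-1], extra = L[-1:], append loop over smaller
def gen_subsets (L : List Int) : List (List Int) :=
  if L.length = 0 then [[]]
  else
    let smaller := gen_subsets (PySem.List.slice L none (some (-1)))
    let extra := PySem.List.slice L (some (-1)) none
    let new := smaller.foldl (fun acc small => acc ++ [small ++ extra]) []
    smaller ++ new
termination_by L.length
decreasing_by
  simp only [PySem.List.slice_to_neg_one, List.length_dropLast]
  omega

-- ===== PORT B =====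
-- transliteration of B: res = [[]]; for x in L: res = res + [s + [x] for s in res]
def gen_subsets_alt (L : List Int) : List (List Int) :=
  L.foldl (fun res x => res ++ res.map (fun s => s ++ [x])) [[]]

-- ===== PRECONDITION & SPEC =====
def Spec_gen_subsets (L : List Int) (out : List (List Int)) : Prop := out = gen_subsets_alt L
instance (L : List Int) (out : List (List Int)) : Decidable (Spec_gen_subsets L out) := by unfold Spec_gen_subsets; infer_instance

-- ===== CLAIM (what is proved, stated in full; the proofs are below) =====
def Claim_equal_gen_subsets : Prop := ∀ (L : List Int), Dom_gen_subsets L → Spec_gen_subsets L (gen_subsets L)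

-- ===== LEMMAS AND PROOFS =====

-- flatten of singleton-wrapped map is the plain map (shape left by A's append loop)
theorem flatten_map_singleton (L : List (List Int)) (x : Int) :
    (List.map (fun s => [s ++ [x]]) L).flatten = List.map (fun s => s ++ [x]) L := by
  induction L with
  | nil => rfl
  | cons a l ih => simp [ih]

-- one unfolding of A on a list with its last element exposed
theorem gen_subsets_append (xs : List Int) (x : Int) :
    gen_subsets (xs ++ [x]) = gen_subsets xs ++ (gen_subsets xs).map (fun s => s ++ [x]) := by
  rw [gen_subsets]
  simp [PySem.List.slice_to_neg_one, PySem.List.slice_from_neg_one,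
        flatten_map_singleton]

theorem gen_subsets_eq_alt (L : List Int) : gen_subsets L = gen_subsets_alt L := by
  induction L using List.reverseRecOn with
  | nil => rw [gen_subsets]; rfl
  | append_singleton xs x ih =>
      rw [gen_subsets_append, ih]
      simp [gen_subsets_alt, List.foldl_append]

-- ===== VERDICT (by name: the statement is the Claim_ definition above) =====
theorem gen_subsets_spec : Claim_equal_gen_subsets := by
  intro L _
  exact gen_subsets_eq_alt L
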